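-- pv_equiv track=rewrite | github.com/aciderix/Graph-Systems-Exploration | permutation_patterns/scripts/analyze.py | is_unimodal
-- ===== SOURCE A (Python) =====
-- def is_unimodal(c):
--     """Is c unimodal (nonnegative, monotone up then monotone down)?"""
--     c = [int(x) for x in c]
--     n = len(c)
--     i = 0
--     # Skip leading zeros / equal start
--     while i + 1 < n and c[i] <= c[i + 1]:
--         i += 1
--     # Now we should be descending
--     while i + 1 < n and c[i] >= c[i + 1]:
--         i += 1
--     return i == n - 1
-- ===== SOURCE B (Python) =====
-- def is_unimodal(c):
--     """Is c unimodal (nonnegative, monotone up then monotone down)?"""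
--     c = [int(x) for x in c]
--     if not c:
--         return False
--     peak = c.index(max(c))
--     return (all(c[i] <= c[i + 1] for i in range(peak))
--             and all(c[i] >= c[i + 1] for i in range(peak, len(c) - 1)))
-- ===== Notes on version B (the rewrite author's own statement) =====
-- stated objective: alternative
-- what changed: Replaces A's greedy two-phase walk with a find-the-leftmost-maximum-then-verify decomposition: locate the peak via max/index, then check the prefix is non-decreasing and the suffix non-increasing in two independent passes.
import Mathlib
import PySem

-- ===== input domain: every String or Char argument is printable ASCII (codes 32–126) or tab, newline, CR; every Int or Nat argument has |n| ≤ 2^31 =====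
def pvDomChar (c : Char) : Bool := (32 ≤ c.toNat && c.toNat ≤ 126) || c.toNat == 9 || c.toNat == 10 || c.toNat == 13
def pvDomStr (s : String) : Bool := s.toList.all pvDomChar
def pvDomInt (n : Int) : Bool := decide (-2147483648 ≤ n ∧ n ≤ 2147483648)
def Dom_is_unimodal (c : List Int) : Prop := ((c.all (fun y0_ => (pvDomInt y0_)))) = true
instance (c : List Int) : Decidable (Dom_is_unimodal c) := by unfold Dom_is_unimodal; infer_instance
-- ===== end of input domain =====

-- B replaces A's greedy two-phase walk with leftmost-argmax + two independent verification passes (alternative decomposition, same cost).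


-- ===== PORT A =====
-- while i + 1 < n and c[i] <= c[i + 1]: i += 1
def upLoop (c : List Int) (n i : Nat) : Nat :=
  if h : i + 1 < n ∧ c.getD i 0 ≤ c.getD (i + 1) 0 then upLoop c n (i + 1) else i
termination_by n - i
decreasing_by omega

-- while i + 1 < n and c[i] >= c[i + 1]: i += 1
def downLoop (c : List Int) (n i : Nat) : Nat :=
  if h : i + 1 < n ∧ c.getD i 0 ≥ c.getD (i + 1) 0 then downLoop c n (i + 1) else i
termination_by n - i
decreasing_by omega

def is_unimodal (c : List Int) : Bool :=
  let n := c.length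
  let i := upLoop c n 0
  let i2 := downLoop c n i
  decide ((i2 : Int) = (n : Int) - 1)

-- ===== PORT B =====
def is_unimodal_alt (c : List Int) : Bool :=
  if c = [] then false
  else
    match PySem.List.max? c (fun x => x) with
    | none => false          -- unreachable: c ≠ []
    | some m =>
      match PySem.List.index? c m with
      | none => false        -- unreachable: m ∈ c
      | some peak =>
        ((PySem.List.pyRange 0 (peak : Int) 1).all
            (fun i => PySem.List.pyGetD c i 0 ≤ PySem.List.pyGetD c (i + 1) 0)) &&
        ((PySem.List.pyRange (peak : Int) ((c.length : Int) - 1) 1).all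
            (fun i => PySem.List.pyGetD c i 0 ≥ PySem.List.pyGetD c (i + 1) 0))

-- ===== PRECONDITION & SPEC =====
def Spec_is_unimodal (c : List Int) (out : Bool) : Prop := out = is_unimodal_alt c
instance (c : List Int) (out : Bool) : Decidable (Spec_is_unimodal c out) := by unfold Spec_is_unimodal; infer_instance

-- ===== CLAIM (what is proved, stated in full; the proofs are below) =====
def Claim_equal_is_unimodal : Prop := ∀ (c : List Int), Dom_is_unimodal c → Spec_is_unimodal c (is_unimodal c)

-- ===== LEMMAS AND PROOFS =====

def Uni (c : List Int) : Prop :=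
  ∃ p, p < c.length ∧
    (∀ k, k < p → c.getD k 0 ≤ c.getD (k + 1) 0) ∧
    (∀ k, p ≤ k → k + 1 < c.length → c.getD k 0 ≥ c.getD (k + 1) 0)

lemma upLoop_lt (c : List Int) (n i : Nat) (h : i < n) : upLoop c n i < n := by
  induction i using upLoop.induct c n with
  | case1 i hc ih => rw [upLoop, dif_pos hc]; exact ih (by omega)
  | case2 i hc => rw [upLoop, dif_neg hc]; omega

lemma upLoop_stop (c : List Int) (n i : Nat) :
    ¬ (upLoop c n i + 1 < n ∧ c.getD (upLoop c n i) 0 ≤ c.getD (upLoop c n i + 1) 0) := by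
  induction i using upLoop.induct c n with
  | case1 i hc ih => rw [upLoop, dif_pos hc]; exact ih
  | case2 i hc => rw [upLoop, dif_neg hc]; exact hc

lemma upLoop_steps (c : List Int) (n i : Nat) :
    ∀ k, i ≤ k → k < upLoop c n i → c.getD k 0 ≤ c.getD (k + 1) 0 := by
  induction i using upLoop.induct c n with
  | case1 i hc ih =>
    intro k hk hk2
    rw [upLoop, dif_pos hc] at hk2
    rcases Nat.eq_or_lt_of_le hk with rfl | h
    · exact hc.2
    · exact ih k h hk2
  | case2 i hc =>
    intro k hk hk2
    rw [upLoop, dif_neg hc] at hk2; omega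

lemma downLoop_steps (c : List Int) (n i : Nat) :
    ∀ k, i ≤ k → k < downLoop c n i → c.getD k 0 ≥ c.getD (k + 1) 0 := by
  induction i using downLoop.induct c n with
  | case1 i hc ih =>
    intro k hk hk2
    rw [downLoop, dif_pos hc] at hk2
    rcases Nat.eq_or_lt_of_le hk with rfl | h
    · exact hc.2
    · exact ih k h hk2
  | case2 i hc =>
    intro k hk hk2
    rw [downLoop, dif_neg hc] at hk2; omega

lemma downLoop_end (c : List Int) (n i : Nat) (hi : i < n)
    (h : ∀ k, i ≤ k → k + 1 < n → c.getD k 0 ≥ c.getD (k + 1) 0) :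
    downLoop c n i = n - 1 := by
  induction i using downLoop.induct c n with
  | case1 i hc ih =>
    rw [downLoop, dif_pos hc]
    exact ih (by omega) (fun k hk hk2 => h k (by omega) hk2)
  | case2 i hc =>
    rw [downLoop, dif_neg hc]
    by_contra hne
    exact hc ⟨by omega, h i le_rfl (by omega)⟩

lemma A_iff_Uni (c : List Int) : is_unimodal c = true ↔ Uni c := by
  unfold is_unimodal
  simp only [decide_eq_true_eq]
  constructor
  · intro hA
    set n := c.length with hn
    set u := upLoop c n 0 with hu
    set d := downLoop c n u with hd
    have hdn : d + 1 = n := by omega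
    refine ⟨u, upLoop_lt c n 0 (by omega), fun k hk => upLoop_steps c n 0 k (by omega) hk, ?_⟩
    intro k hk hk1
    exact downLoop_steps c n u k hk (by omega)
  · rintro ⟨p, hp, hup, hdown⟩
    set n := c.length with hn
    have hpu : p ≤ upLoop c n 0 := by
      by_contra h
      push Not at h
      exact upLoop_stop c n 0 ⟨by omega, hup _ h⟩
    have hu_lt : upLoop c n 0 < n := upLoop_lt c n 0 (by omega)
    have hde : downLoop c n (upLoop c n 0) = n - 1 :=
      downLoop_end c n _ hu_lt (fun k hk hk2 => hdown k (le_trans hpu hk) hk2)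
    rw [hde]; omega

lemma chain_mono (c : List Int) (p : Nat)
    (h : ∀ k, k < p → c.getD k 0 ≤ c.getD (k + 1) 0) :
    ∀ j k, j ≤ k → k ≤ p → c.getD j 0 ≤ c.getD k 0 := by
  intro j k
  induction k with
  | zero => intro hjk _; interval_cases j; exact le_rfl
  | succ k ih =>
    intro hjk hkp
    rcases Nat.eq_or_lt_of_le hjk with rfl | hlt
    · exact le_rfl
    · exact le_trans (ih (by omega) (by omega)) (h k (by omega))

lemma chain_anti (c : List Int) (p : Nat)
    (h : ∀ k, p ≤ k → k + 1 < c.length → c.getD k 0 ≥ c.getD (k + 1) 0) :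
    ∀ j k, p ≤ j → j ≤ k → k < c.length → c.getD j 0 ≥ c.getD k 0 := by
  intro j k
  induction k with
  | zero => intro _ hjk _; interval_cases j; exact le_rfl
  | succ k ih =>
    intro hpj hjk hk
    rcases Nat.eq_or_lt_of_le hjk with rfl | hlt
    · exact le_rfl
    · exact ge_trans (ih hpj (by omega) (by omega)) (h k (by omega) (by omega))

lemma allRange_le_iff (c : List Int) (a b : Int) (ha : 0 ≤ a) :
    (((PySem.List.pyRange a b 1).all
        (fun i => decide (PySem.List.pyGetD c i 0 ≤ PySem.List.pyGetD c (i + 1) 0))) = true)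
    ↔ ∀ k : Nat, a ≤ (k : Int) → (k : Int) < b → c.getD k 0 ≤ c.getD (k + 1) 0 := by
  rw [List.all_eq_true]
  constructor
  · intro H k hk1 hk2
    have := H (k : Int) (by rw [PySem.List.mem_pyRange_one]; omega)
    have e1 : ((k : Int) + 1) = ((k + 1 : Nat) : Int) := by push_cast; ring
    rw [e1, PySem.List.pyGetD_natCast, PySem.List.pyGetD_natCast, decide_eq_true_eq] at this
    exact this
  · intro H x hx
    rw [PySem.List.mem_pyRange_one] at hx
    have hx0 : 0 ≤ x := le_trans ha hx.1
    have e : x = ((x.toNat : Nat) : Int) := by omega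
    rw [e]
    have e1 : (((x.toNat : Nat) : Int) + 1) = ((x.toNat + 1 : Nat) : Int) := by push_cast; ring
    rw [e1, PySem.List.pyGetD_natCast, PySem.List.pyGetD_natCast, decide_eq_true_eq]
    exact H x.toNat (by omega) (by omega)

lemma allRange_ge_iff (c : List Int) (a b : Int) (ha : 0 ≤ a) :
    (((PySem.List.pyRange a b 1).all
        (fun i => decide (PySem.List.pyGetD c i 0 ≥ PySem.List.pyGetD c (i + 1) 0))) = true)
    ↔ ∀ k : Nat, a ≤ (k : Int) → (k : Int) < b → c.getD k 0 ≥ c.getD (k + 1) 0 := by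
  rw [List.all_eq_true]
  constructor
  · intro H k hk1 hk2
    have := H (k : Int) (by rw [PySem.List.mem_pyRange_one]; omega)
    have e1 : ((k : Int) + 1) = ((k + 1 : Nat) : Int) := by push_cast; ring
    rw [e1, PySem.List.pyGetD_natCast, PySem.List.pyGetD_natCast, decide_eq_true_eq] at this
    exact this
  · intro H x hx
    rw [PySem.List.mem_pyRange_one] at hx
    have hx0 : 0 ≤ x := le_trans ha hx.1
    have e : x = ((x.toNat : Nat) : Int) := by omega
    rw [e]
    have e1 : (((x.toNat : Nat) : Int) + 1) = ((x.toNat + 1 : Nat) : Int) := by push_cast; ring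
    rw [e1, PySem.List.pyGetD_natCast, PySem.List.pyGetD_natCast, decide_eq_true_eq]
    exact H x.toNat (by omega) (by omega)

lemma B_iff_Uni (c : List Int) : is_unimodal_alt c = true ↔ Uni c := by
  unfold is_unimodal_alt
  by_cases hne : c = []
  · subst hne
    simp [Uni]
  · rw [if_neg hne]
    obtain ⟨m, hm⟩ : ∃ m, PySem.List.max? c (fun x => x) = some m := by
      cases h : PySem.List.max? c (fun x => x) with
      | none => exact absurd (((PySem.List.max?_eq_none_iff c (fun x => x)).mp h)) hne
      | some m => exact ⟨m, rfl⟩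
    have hmem : m ∈ c := PySem.List.max?_mem hm
    have hmax : ∀ y ∈ c, y ≤ m := by
      intro y hy; exact PySem.List.max?_isMax hm y hy
    obtain ⟨peak, hpk⟩ : ∃ k, PySem.List.index? c m = some k := by
      cases h : PySem.List.index? c m with
      | none => exact absurd (((PySem.List.index?_eq_none_iff c m).mp h)) (by simp [hmem])
      | some k => exact ⟨k, rfl⟩
    obtain ⟨hpk_lt, hpk_val, hpk_first⟩ := PySem.List.getElem_of_index?_eq_some hpk
    simp only [hm, hpk]
    rw [Bool.and_eq_true, allRange_le_iff c 0 (peak : Int) (by omega),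
        allRange_ge_iff c (peak : Int) ((c.length : Int) - 1) (by omega)]
    constructor
    · rintro ⟨h1, h2⟩
      exact ⟨peak, hpk_lt, fun k hk => h1 k (by omega) (by omega),
        fun k hk hk1 => h2 k (by omega) (by omega)⟩
    · rintro ⟨p, hp, hup, hdown⟩
      have hgd : ∀ j (h : j < c.length), c.getD j 0 = getElem c j h := by
        intro j h; rw [List.getD_eq_getElem c 0 h]
      have hmax' : ∀ j (h : j < c.length), getElem c j h ≤ m := fun j h => hmax _ (List.getElem_mem h)
      -- c[p] is a maximum
      have hpmax : ∀ j, j < c.length → c.getD j 0 ≤ c.getD p 0 := by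
        intro j hj
        by_cases h : j ≤ p
        · exact chain_mono c p hup j p h le_rfl
        · exact chain_anti c p hdown p j le_rfl (by omega) hj
      have hcp : c.getD p 0 = m := by
        obtain ⟨j, hj, hjv⟩ := List.getElem_of_mem hmem
        have h1 : c.getD p 0 ≤ m := by rw [hgd p hp]; exact hmax' p hp
        have h2 : m ≤ c.getD p 0 := by rw [← hjv, ← hgd j hj]; exact hpmax j hj
        omega
      have hpeak_le : peak ≤ p := by
        by_contra h
        push Not at h
        exact hpk_first p h (by rw [← hgd p hp]; exact hcp)
      have hconst : ∀ k, peak ≤ k → k ≤ p → c.getD k 0 = m := by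
        intro k h1 h2
        have hlo : m ≤ c.getD k 0 := by
          have := chain_mono c p hup peak k h1 h2
          rw [hgd peak hpk_lt, hpk_val] at this
          omega
        have hhi : c.getD k 0 ≤ m := by
          rw [hgd k (by omega)]; exact hmax' k (by omega)
        omega
      refine ⟨?_, ?_⟩
      · intro k _ hk2
        exact hup k (by omega)
      · intro k hk1 hk2
        by_cases h : p ≤ k
        · exact hdown k h (by omega)
        · have e1 : c.getD k 0 = m := hconst k (by omega) (by omega)
          have e2 : c.getD (k + 1) 0 = m := hconst (k + 1) (by omega) (by omega)
          omega

-- ===== VERDICT (by name: the statement is the Claim_ definition above) =====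
theorem is_unimodal_spec : Claim_equal_is_unimodal := by
  intro c _
  unfold Spec_is_unimodal
  have h := (A_iff_Uni c).trans (B_iff_Uni c).symm
  cases ha : is_unimodal c <;> cases hb : is_unimodal_alt c <;> simp_all
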